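-- pv_equiv track=rewrite | github.com/fcole90/quack | quackdns/core.py | is_valid_domains
-- ===== SOURCE A (Python) =====
-- def is_valid_domains(domains):
--     if domains is None or domains == "":
--         return False
--
--     domains_list = domains.split(",")
--
--     for domain in domains_list:
--         # todo: use a regex
--         if domain == "":  # Empty string
--             return False
--         if " " in domain:  # Contains whitespaces
--             return False
--
--     return True
-- ===== SOURCE B (Python) =====
-- def is_valid_domains(domains):
--     # Single left-to-right scan, no split: reject a space anywhere and an
--     # empty segment (leading/trailing separator or two separators in a row).
--     if domains is None or domains == "":
--         return False
--     prev = ","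
--     for ch in domains:
--         if ch == " " or (ch == "," and prev == ","):
--             return False
--         prev = ch
--     return prev != ","
-- ===== Notes on version B (the rewrite author's own statement) =====
-- stated objective: simpler
-- what changed: Replaces the split-on-comma plus per-segment loop with a single character scan that tracks the previous character, rejecting a space or an empty segment on the fly.
import Mathlib
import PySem

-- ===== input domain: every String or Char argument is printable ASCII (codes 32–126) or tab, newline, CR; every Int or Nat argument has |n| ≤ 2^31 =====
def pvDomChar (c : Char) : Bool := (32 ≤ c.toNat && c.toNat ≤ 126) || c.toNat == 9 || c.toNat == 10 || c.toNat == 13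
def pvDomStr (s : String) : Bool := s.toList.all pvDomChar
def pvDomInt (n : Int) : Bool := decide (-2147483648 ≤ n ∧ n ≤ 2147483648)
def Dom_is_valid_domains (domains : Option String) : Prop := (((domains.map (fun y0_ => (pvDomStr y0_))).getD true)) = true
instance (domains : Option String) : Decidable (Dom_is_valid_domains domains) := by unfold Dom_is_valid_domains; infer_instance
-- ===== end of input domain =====

-- B replaces split(",") + per-segment loop by one character scan tracking the previous character (simpler; same O(n) cost).

-- ===== PORT A =====
-- the 'for domain in domains_list' loop with its two early returns
def aLoop : List (List Char) → Bool
  | [] => true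
  | d :: rest =>
    if d = [] then false
    else if PySem.Chars.isIn " ".toList d then false
    else aLoop rest

def is_valid_domains (domains : Option String) : Bool :=
  match domains with
  | none => false
  | some s =>
    if s = "" then false
    else
      let domains_list := PySem.Chars.splitOn s.toList ",".toList  -- domains.split(",")
      aLoop domains_list

-- ===== PORT B =====
-- the 'for ch in domains' scan carrying prev
def bLoop : List Char → Char → Bool
  | [], prev => decide (prev ≠ ',')
  | c :: rest, prev =>
    if c = ' ' || (c = ',' && prev = ',') then false
    else bLoop rest c

def is_valid_domains_alt (domains : Option String) : Bool :=
  match domains with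
  | none => false
  | some s =>
    if s = "" then false
    else bLoop s.toList ','

-- ===== PRECONDITION & SPEC =====
def Spec_is_valid_domains (domains : Option String) (out : Bool) : Prop := out = is_valid_domains_alt domains
instance (domains : Option String) (out : Bool) : Decidable (Spec_is_valid_domains domains out) := by unfold Spec_is_valid_domains; infer_instance

-- ===== CLAIM (what is proved, stated in full; the proofs are below) =====
def Claim_equal_is_valid_domains : Prop := ∀ (domains : Option String), Dom_is_valid_domains domains → Spec_is_valid_domains domains (is_valid_domains domains)

-- ===== LEMMAS AND PROOFS =====

-- structural version of splitOn for the one-character separator ','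
def splitAux : List Char → List Char → List (List Char)
  | [], cur => [cur.reverse]
  | c :: rest, cur =>
    if c = ',' then cur.reverse :: splitAux rest []
    else splitAux rest (c :: cur)

theorem go_eq_splitAux (fuel : Nat) (l cur : List Char) (acc : List (List Char))
    (h : l.length ≤ fuel) :
    PySem.Chars.splitOn.go [','] fuel l cur acc = acc.reverse ++ splitAux l cur := by
  induction fuel generalizing l cur acc with
  | zero =>
    have : l = [] := List.eq_nil_of_length_eq_zero (Nat.le_zero.mp h)
    subst this
    simp [PySem.Chars.splitOn.go, splitAux]
  | succ n ih =>
    cases l with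
    | nil => simp [PySem.Chars.splitOn.go, splitAux]
    | cons c rest =>
      by_cases hc : c = ','
      · subst hc
        rw [show PySem.Chars.splitOn.go [','] (n+1) (',' :: rest) cur acc
              = PySem.Chars.splitOn.go [','] n rest [] (cur.reverse :: acc) by
            simp [PySem.Chars.splitOn.go, List.isPrefixOf]]
        rw [ih rest [] (cur.reverse :: acc) (by simpa using Nat.le_of_succ_le_succ h)]
        simp [splitAux]
      · rw [show PySem.Chars.splitOn.go [','] (n+1) (c :: rest) cur acc
              = PySem.Chars.splitOn.go [','] n rest (c :: cur) acc by
            simp [PySem.Chars.splitOn.go, List.isPrefixOf, Ne.symm hc]]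
        rw [ih rest (c :: cur) acc (by simpa using Nat.le_of_succ_le_succ h)]
        simp [splitAux, hc]

theorem splitOn_eq_splitAux (cs : List Char) :
    PySem.Chars.splitOn cs [','] = splitAux cs [] := by
  unfold PySem.Chars.splitOn
  simpa using go_eq_splitAux (cs.length + 1) cs [] [] (by omega)

theorem isIn_space (d : List Char) : PySem.Chars.isIn [' '] d = true ↔ ' ' ∈ d := by
  rw [PySem.Chars.isIn_iff_infix]
  constructor
  · rintro ⟨p, q, rfl⟩; simp
  · intro h
    obtain ⟨p, q, rfl⟩ := List.append_of_mem h
    exact ⟨p, q, by simp⟩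

theorem aLoop_of_space (cs cur : List Char) (h : ' ' ∈ cur) :
    aLoop (splitAux cs cur) = false := by
  induction cs generalizing cur with
  | nil =>
    have hne : cur.reverse ≠ [] := by simpa using (by rintro rfl; simp at h : cur ≠ [])
    have hin : PySem.Chars.isIn [' '] cur.reverse = true := (isIn_space _).mpr (by simpa using h)
    simp [splitAux, aLoop, hne, hin]
  | cons c rest ih =>
    by_cases hc : c = ','
    · subst hc
      have hne : cur.reverse ≠ [] := by simpa using (by rintro rfl; simp at h : cur ≠ [])
      have hin : PySem.Chars.isIn [' '] cur.reverse = true := (isIn_space _).mpr (by simpa using h)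
      simp [splitAux, aLoop, hne, hin]
    · simp only [splitAux, if_neg hc]
      exact ih (c :: cur) (List.mem_cons_of_mem _ h)

theorem bLoop_congr (cs : List Char) (p q : Char) (h : (p = ',') ↔ (q = ',')) :
    bLoop cs p = bLoop cs q := by
  cases cs with
  | nil => simp [bLoop]; exact ⟨fun hp => h.mp hp, fun hq => h.mpr hq⟩
  | cons c rest =>
    simp only [bLoop]
    by_cases hp : p = ','
    · rw [hp, h.mp hp]
    · have hq : ¬ q = ',' := fun hq => hp (h.mpr hq)
      simp [hp, hq]

theorem main_lemma (cs cur : List Char) (hsp : ' ' ∉ cur) :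
    aLoop (splitAux cs cur) = bLoop cs (if cur = [] then ',' else 'a') := by
  induction cs generalizing cur with
  | nil =>
    by_cases hcur : cur = []
    · subst hcur; simp [splitAux, aLoop, bLoop]
    · have hr : cur.reverse ≠ [] := by simpa using hcur
      have hin : PySem.Chars.isIn [' '] cur.reverse = false := by
        rw [Bool.eq_false_iff]
        intro hin; exact hsp (by simpa using (isIn_space _).mp hin)
      simp [splitAux, aLoop, bLoop, hr, hin, hcur]
  | cons c rest ih =>
    by_cases hc : c = ','
    · subst hc
      by_cases hcur : cur = []
      · subst hcur
        simp [splitAux, aLoop, bLoop]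
      · have hr : cur.reverse ≠ [] := by simpa using hcur
        have hin : PySem.Chars.isIn [' '] cur.reverse = false := by
          rw [Bool.eq_false_iff]
          intro h; exact hsp (by simpa using (isIn_space _).mp h)
        rw [show splitAux (',' :: rest) cur = cur.reverse :: splitAux rest [] by
          simp [splitAux]]
        rw [show aLoop (cur.reverse :: splitAux rest []) = aLoop (splitAux rest []) by
          simp [aLoop, hr, hin]]
        rw [ih [] (by simp)]
        simp [bLoop, hcur]
    · by_cases hsp' : c = ' '
      · subst hsp'
        simp only [splitAux, if_neg hc]
        rw [aLoop_of_space rest (' ' :: cur) (by simp)]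
        simp [bLoop]
      · have hmem : ' ' ∉ c :: cur := by
          intro hm
          rcases List.mem_cons.mp hm with h | h
          · exact hsp' h.symm
          · exact hsp h
        simp only [splitAux, if_neg hc]
        rw [ih (c :: cur) hmem]
        rw [if_neg (by simp : ¬(c :: cur = []))]
        rw [bLoop_congr rest 'a' c (by simp [hc])]
        simp [bLoop, hsp', hc]

-- ===== VERDICT (by name: the statement is the Claim_ definition above) =====
theorem is_valid_domains_spec : Claim_equal_is_valid_domains := by
  intro domains _
  unfold Spec_is_valid_domains
  cases domains with
  | none => rfl
  | some s =>
    by_cases hs : s = ""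
    · simp [is_valid_domains, is_valid_domains_alt, hs]
    · simp only [is_valid_domains, is_valid_domains_alt, if_neg hs]
      rw [show ",".toList = [','] from rfl, splitOn_eq_splitAux]
      simpa using main_lemma s.toList [] (by simp)
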